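-- pv_equiv track=rewrite | github.com/aditya-raj9125/Sanskrit-Env | test_agent.py | match_to_option
-- ===== SOURCE A (Python) =====
-- def match_to_option(text, candidates):
--     text_clean = text.strip()
--     for opt in candidates:
--         if text_clean == opt:
--             return opt
--     for opt in candidates:
--         if opt.startswith(text_clean) or text_clean.startswith(opt):
--             return opt
--     for opt in candidates:
--         if text_clean.lower() in opt.lower() or opt.lower() in text_clean.lower():
--             return opt
--     return candidates[0] if candidates else text_clean
-- ===== SOURCE B (Python) =====
-- def _rank(text_clean, opt):
--     if text_clean == opt:
--         return 0
--     if opt.startswith(text_clean) or text_clean.startswith(opt):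
--         return 1
--     if text_clean.lower() in opt.lower() or opt.lower() in text_clean.lower():
--         return 2
--     return 3
--
--
-- def match_to_option(text, candidates):
--     # single pass: keep the first candidate of the smallest priority rank
--     text_clean = text.strip()
--     best_rank, best_opt = 3, None
--     for opt in candidates:
--         r = _rank(text_clean, opt)
--         if r < best_rank:
--             best_rank, best_opt = r, opt
--     if best_opt is not None:
--         return best_opt
--     return candidates[0] if candidates else text_clean
-- ===== Notes on version B (the rewrite author's own statement) =====
-- stated objective: alternative
-- what changed: Replaced A's three ordered full scans of the candidates by a single pass that assigns each candidate a priority rank (exact=0, prefix=1, case-insensitive substring=2) and keeps the first candidate with the strictly smallest rank.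
import Mathlib
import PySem

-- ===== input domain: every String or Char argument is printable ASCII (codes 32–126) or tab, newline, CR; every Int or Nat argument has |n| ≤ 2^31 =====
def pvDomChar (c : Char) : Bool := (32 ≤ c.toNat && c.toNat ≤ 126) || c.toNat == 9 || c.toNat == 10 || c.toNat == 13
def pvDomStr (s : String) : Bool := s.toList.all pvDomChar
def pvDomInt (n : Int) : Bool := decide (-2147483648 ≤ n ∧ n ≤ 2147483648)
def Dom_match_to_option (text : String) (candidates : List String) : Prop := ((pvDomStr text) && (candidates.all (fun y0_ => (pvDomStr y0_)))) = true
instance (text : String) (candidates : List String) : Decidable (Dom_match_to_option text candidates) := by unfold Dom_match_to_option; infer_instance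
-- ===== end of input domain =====

-- B replaces A's three ordered scans by one pass keeping the first candidate of smallest
-- priority rank (alternative decomposition, same cost class).

-- ===== PORT A =====
-- each 'for … return' loop of A is the corresponding List.find? over the same predicate
def match_to_option (text : String) (candidates : List String) : String :=
  let text_clean := PySem.Str.strip text
  match candidates.find? (fun opt => text_clean == opt) with
  | some opt => opt
  | none =>
    match candidates.find? (fun opt =>
        PySem.Str.startswith opt text_clean || PySem.Str.startswith text_clean opt) with
    | some opt => opt
    | none =>
      match candidates.find? (fun opt =>
          PySem.Str.isIn (PySem.Str.lower text_clean) (PySem.Str.lower opt)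
            || PySem.Str.isIn (PySem.Str.lower opt) (PySem.Str.lower text_clean)) with
      | some opt => opt
      | none => match candidates with | [] => text_clean | opt :: _ => opt

-- ===== PORT B =====
-- Source B's helper _rank
def pvRank (text_clean opt : String) : Nat :=
  if text_clean == opt then 0
  else if PySem.Str.startswith opt text_clean || PySem.Str.startswith text_clean opt then 1
  else if PySem.Str.isIn (PySem.Str.lower text_clean) (PySem.Str.lower opt)
      || PySem.Str.isIn (PySem.Str.lower opt) (PySem.Str.lower text_clean) then 2
  else 3

-- Source B's single loop as a foldl over the state (best_rank, best_opt)
def match_to_option_alt (text : String) (candidates : List String) : String :=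
  let text_clean := PySem.Str.strip text
  let best := candidates.foldl
    (fun (acc : Nat × Option String) opt =>
      let r := pvRank text_clean opt
      if r < acc.1 then (r, some opt) else acc) ((3 : Nat), (none : Option String))
  match best.2 with
  | some opt => opt
  | none => match candidates with | [] => text_clean | opt :: _ => opt

-- ===== PRECONDITION & SPEC =====
def Spec_match_to_option (text : String) (candidates : List String) (out : String) : Prop := out = match_to_option_alt text candidates
instance (text : String) (candidates : List String) (out : String) : Decidable (Spec_match_to_option text candidates out) := by unfold Spec_match_to_option; infer_instance

-- ===== CLAIM (what is proved, stated in full; the proofs are below) =====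
def Claim_equal_match_to_option : Prop := ∀ (text : String) (candidates : List String), Dom_match_to_option text candidates → Spec_match_to_option text candidates (match_to_option text candidates)

-- ===== LEMMAS AND PROOFS =====

-- running minimum of ranks, used only to characterise B's fold
def pvMinF (tc : String) (l : List String) (b : Nat) : Nat :=
  l.foldl (fun a o => min a (pvRank tc o)) b

theorem pvMinF_le_init (tc : String) (l : List String) : ∀ b, pvMinF tc l b ≤ b := by
  induction l with
  | nil => intro b; simp [pvMinF]
  | cons o t ih =>
    intro b
    have := ih (min b (pvRank tc o))
    simp only [pvMinF, List.foldl_cons] at *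
    exact le_trans this (Nat.min_le_left _ _)

theorem pvMinF_le_mem (tc : String) (l : List String) :
    ∀ b x, x ∈ l → pvMinF tc l b ≤ pvRank tc x := by
  induction l with
  | nil => intro b x hx; simp at hx
  | cons o t ih =>
    intro b x hx
    rcases List.mem_cons.1 hx with h | h
    · subst h
      have := pvMinF_le_init tc t (min b (pvRank tc x))
      simp only [pvMinF, List.foldl_cons]
      exact le_trans this (Nat.min_le_right _ _)
    · exact ih (min b (pvRank tc o)) x h

theorem pvMinF_exists (tc : String) (l : List String) :
    ∀ b, pvMinF tc l b < b → ∃ x ∈ l, pvRank tc x = pvMinF tc l b := by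
  induction l with
  | nil => intro b h; simp [pvMinF] at h
  | cons o t ih =>
    intro b h
    simp only [pvMinF, List.foldl_cons] at h ⊢
    by_cases h' : pvMinF tc t (min b (pvRank tc o)) < min b (pvRank tc o)
    · obtain ⟨x, hx, he⟩ := ih _ h'
      exact ⟨x, List.mem_cons_of_mem _ hx, he⟩
    · have heq : pvMinF tc t (min b (pvRank tc o)) = min b (pvRank tc o) :=
        le_antisymm (pvMinF_le_init _ _ _) (Nat.le_of_not_lt h')
      simp only [pvMinF] at heq
      rw [heq] at h ⊢
      rcases min_choice b (pvRank tc o) with hc | hc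
      · rw [hc] at h; exact absurd h (lt_irrefl _)
      · exact ⟨o, List.mem_cons_self, hc.symm⟩

-- B's fold computes (running min, first candidate attaining it)
theorem pvFold_char (tc : String) (l : List String) : ∀ (b : Nat) (w : Option String),
    l.foldl (fun (acc : Nat × Option String) opt =>
      if pvRank tc opt < acc.1 then (pvRank tc opt, some opt) else acc) (b, w)
    = (pvMinF tc l b,
       if pvMinF tc l b < b then l.find? (fun o => pvRank tc o == pvMinF tc l b) else w) := by
  induction l with
  | nil => intro b w; simp [pvMinF]
  | cons o t ih =>
    intro b w
    simp only [List.foldl_cons, pvMinF, List.find?_cons]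
    by_cases h : pvRank tc o < b
    · simp only [if_pos h]
      rw [ih (pvRank tc o) (some o)]
      simp only [pvMinF]
      have hmin : min b (pvRank tc o) = pvRank tc o := Nat.min_eq_right (le_of_lt h)
      have hle : pvMinF tc t (pvRank tc o) ≤ pvRank tc o := pvMinF_le_init _ _ _
      simp only [pvMinF] at hle
      rw [hmin]
      by_cases h2 : t.foldl (fun a o => min a (pvRank tc o)) (pvRank tc o) < pvRank tc o
      · have hne : (pvRank tc o == t.foldl (fun a o => min a (pvRank tc o)) (pvRank tc o)) = false := by
          simp; omega
        simp only [if_pos h2, hne, if_pos (lt_trans h2 h)]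
      · have heq : t.foldl (fun a o => min a (pvRank tc o)) (pvRank tc o) = pvRank tc o := by omega
        rw [heq]
        simp only [if_neg (lt_irrefl _), beq_self_eq_true, if_pos h]
    · simp only [if_neg h]
      rw [ih b w]
      simp only [pvMinF]
      have hmin : min b (pvRank tc o) = b := Nat.min_eq_left (Nat.le_of_not_lt h)
      rw [hmin]
      by_cases h2 : t.foldl (fun a o => min a (pvRank tc o)) b < b
      · have hne : (pvRank tc o == t.foldl (fun a o => min a (pvRank tc o)) b) = false := by
          simp
          omega
        simp only [if_pos h2, hne]
      · simp only [if_neg h2]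

-- find? only depends on the predicate's values on members
theorem pvFind?_congr_mem {α : Type} {p q : α → Bool} (l : List α)
    (h : ∀ x ∈ l, p x = q x) : l.find? p = l.find? q := by
  induction l with
  | nil => rfl
  | cons o t ih =>
    have ho := h o List.mem_cons_self
    simp only [List.find?_cons, ho]
    cases q o
    · exact ih (fun x hx => h x (List.mem_cons_of_mem _ hx))
    · rfl

theorem pvStartswith_self (s : List Char) : PySem.Chars.startswith s s = true :=
  (PySem.Chars.startswith_iff _ _).2 (List.prefix_refl _)

theorem pvIsIn_self (s : List Char) : PySem.Chars.isIn s s = true :=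
  (PySem.Chars.isIn_iff_infix _ _).2 (List.infix_refl _)

theorem pvLower_isIn_of_startswith (a b : List Char) (h : PySem.Chars.startswith a b = true) :
    PySem.Chars.isIn (PySem.Chars.lower b) (PySem.Chars.lower a) = true := by
  rw [PySem.Chars.isIn_iff_infix]
  have hp := (PySem.Chars.startswith_iff _ _).1 h
  simpa [PySem.Chars.lower] using (hp.map PySem.Chars.lowerChar).isInfix

-- A's three predicates are exactly 'rank ≤ k'
theorem pvPred0 (tc o : String) : (tc == o) = decide (pvRank tc o ≤ 0) := by
  unfold pvRank
  split_ifs <;> simp_all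

theorem pvPred1 (tc o : String) :
    (PySem.Str.startswith o tc || PySem.Str.startswith tc o) = decide (pvRank tc o ≤ 1) := by
  unfold pvRank
  split_ifs with h1 h2 h3
  · have : tc = o := eq_of_beq h1
    subst this
    simp [pvStartswith_self]
  · rw [h2]; rfl
  · simp_all
  · simp_all

theorem pvPred2 (tc o : String) :
    (PySem.Str.isIn (PySem.Str.lower tc) (PySem.Str.lower o)
      || PySem.Str.isIn (PySem.Str.lower o) (PySem.Str.lower tc)) = decide (pvRank tc o ≤ 2) := by
  unfold pvRank
  split_ifs with h1 h2 h3
  · have : tc = o := eq_of_beq h1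
    subst this
    simp [pvIsIn_self]
  · simp only [PySem.Str.startswith_eq, Bool.or_eq_true] at h2
    simp only [PySem.Str.isIn_eq, PySem.Str.toList_lower]
    have hh : (PySem.Chars.isIn (PySem.Chars.lower tc.toList) (PySem.Chars.lower o.toList) ||
        PySem.Chars.isIn (PySem.Chars.lower o.toList) (PySem.Chars.lower tc.toList)) = true := by
      rcases h2 with h | h
      · exact Bool.or_eq_true_iff.2 (Or.inl (pvLower_isIn_of_startswith _ _ h))
      · exact Bool.or_eq_true_iff.2 (Or.inr (pvLower_isIn_of_startswith _ _ h))
    rw [hh]; rfl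
  · rw [h3]; rfl
  · simp_all

theorem pvRank_le_three (tc o : String) : pvRank tc o ≤ 3 := by
  unfold pvRank; split_ifs <;> omega

-- ===== VERDICT (by name: the statement is the Claim_ definition above) =====
theorem match_to_option_spec : Claim_equal_match_to_option := by
  intro text candidates _
  simp only [Spec_match_to_option, match_to_option, match_to_option_alt]
  set tc := PySem.Str.strip text with htc
  rw [pvFold_char tc candidates 3 none]
  set m := pvMinF tc candidates 3 with hm
  have hm3 : m ≤ 3 := pvMinF_le_init tc candidates 3
  rw [show (fun opt => tc == opt) = (fun opt => decide (pvRank tc opt ≤ 0)) from funext (pvPred0 tc),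
      show (fun opt => PySem.Str.startswith opt tc || PySem.Str.startswith tc opt)
        = (fun opt => decide (pvRank tc opt ≤ 1)) from funext (pvPred1 tc),
      show (fun opt => PySem.Str.isIn (PySem.Str.lower tc) (PySem.Str.lower opt)
            || PySem.Str.isIn (PySem.Str.lower opt) (PySem.Str.lower tc))
        = (fun opt => decide (pvRank tc opt ≤ 2)) from funext (pvPred2 tc)]
  by_cases hlt : m < 3
  · -- some candidate matches: both sides return the first candidate of minimal rank
    simp only [if_pos hlt]
    have hmem : ∀ x ∈ candidates, m ≤ pvRank tc x := fun x hx => pvMinF_le_mem tc candidates 3 x hx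
    obtain ⟨x0, hx0, he0⟩ := pvMinF_exists tc candidates 3 hlt
    rw [← hm] at he0
    have hsome : (candidates.find? (fun o => pvRank tc o == m)).isSome := by
      rw [List.find?_isSome]
      exact ⟨x0, hx0, by simp [he0]⟩
    obtain ⟨y, hy⟩ := Option.isSome_iff_exists.1 hsome
    interval_cases m
    · have h0 : candidates.find? (fun o => decide (pvRank tc o ≤ 0))
          = candidates.find? (fun o => pvRank tc o == 0) := by
        refine pvFind?_congr_mem _ (fun x hx => ?_)
        have := hmem x hx
        rw [Bool.eq_iff_iff]
        simp only [decide_eq_true_eq, beq_iff_eq]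
        omega
      rw [h0, hy]
    · have h0 : candidates.find? (fun o => decide (pvRank tc o ≤ 0)) = none := by
        rw [List.find?_eq_none]
        intro x hx; have := hmem x hx
        simp only [decide_eq_true_eq]
        omega
      have h1 : candidates.find? (fun o => decide (pvRank tc o ≤ 1))
          = candidates.find? (fun o => pvRank tc o == 1) := by
        refine pvFind?_congr_mem _ (fun x hx => ?_)
        have := hmem x hx
        rw [Bool.eq_iff_iff]
        simp only [decide_eq_true_eq, beq_iff_eq]
        omega
      rw [h0, h1, hy]
    · have h0 : candidates.find? (fun o => decide (pvRank tc o ≤ 0)) = none := by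
        rw [List.find?_eq_none]
        intro x hx; have := hmem x hx
        simp only [decide_eq_true_eq]
        omega
      have h1 : candidates.find? (fun o => decide (pvRank tc o ≤ 1)) = none := by
        rw [List.find?_eq_none]
        intro x hx; have := hmem x hx
        simp only [decide_eq_true_eq]
        omega
      have h2 : candidates.find? (fun o => decide (pvRank tc o ≤ 2))
          = candidates.find? (fun o => pvRank tc o == 2) := by
        refine pvFind?_congr_mem _ (fun x hx => ?_)
        have := hmem x hx
        rw [Bool.eq_iff_iff]
        simp only [decide_eq_true_eq, beq_iff_eq]
        omega
      rw [h0, h1, h2, hy]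
  · -- no candidate matches at all: both sides take the fallback branch
    have hmem : ∀ x ∈ candidates, pvRank tc x = 3 := by
      intro x hx
      have h1 := pvMinF_le_mem tc candidates 3 x hx
      have h2 := pvRank_le_three tc x
      omega
    have h0 : candidates.find? (fun o => decide (pvRank tc o ≤ 0)) = none := by
      rw [List.find?_eq_none]; intro x hx; have := hmem x hx
      simp only [decide_eq_true_eq]; omega
    have h1 : candidates.find? (fun o => decide (pvRank tc o ≤ 1)) = none := by
      rw [List.find?_eq_none]; intro x hx; have := hmem x hx
      simp only [decide_eq_true_eq]; omega
    have h2 : candidates.find? (fun o => decide (pvRank tc o ≤ 2)) = none := by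
      rw [List.find?_eq_none]; intro x hx; have := hmem x hx
      simp only [decide_eq_true_eq]; omega
    simp only [if_neg hlt, h0, h1, h2]
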